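-- pv_equiv track=rewrite | github.com/xmlongan/hsvmoment | src/hsvmoment/archive/simplify_terms.py | is_expr
-- ===== SOURCE A (Python) =====
-- def is_expr(term):
--   '''
--   Check whether a term is a expression containing operators
--
--   :param term: a term or expression.
--   :type string: str
--
--   :return: True or False.
--   :rtype: bool
--   '''
--   operators = ['+','-','*','/','^','(',')']
--   flag = False
--   for op in operators:
--     if op in term:
--       flag = True
--       break
--   return(flag)
-- ===== SOURCE B (Python) =====
-- def is_expr(term):
--   '''Check whether a term is an expression containing operators.'''
--   ops = {'+', '-', '*', '/', '^', '(', ')'}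
--   return any(c in ops for c in term)
-- ===== Notes on version B (the rewrite author's own statement) =====
-- stated objective: idiomatic
-- what changed: Instead of scanning the whole string once per operator (seven substring scans with a flag/break loop), B builds a set of the seven one-character operators and makes a single pass over the string's characters, returning True at the first character in the set.
import Mathlib
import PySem

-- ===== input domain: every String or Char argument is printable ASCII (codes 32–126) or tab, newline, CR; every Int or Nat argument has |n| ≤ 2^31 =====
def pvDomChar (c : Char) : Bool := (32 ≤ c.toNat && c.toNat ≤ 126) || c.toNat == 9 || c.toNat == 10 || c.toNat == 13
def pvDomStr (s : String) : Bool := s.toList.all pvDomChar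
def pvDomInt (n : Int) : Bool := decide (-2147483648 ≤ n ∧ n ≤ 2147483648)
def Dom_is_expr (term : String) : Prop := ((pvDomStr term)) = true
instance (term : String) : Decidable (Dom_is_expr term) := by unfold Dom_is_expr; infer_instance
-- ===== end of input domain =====

-- B replaces A's seven whole-string substring scans with one pass over the
-- characters against a set of the operator characters (idiomatic `any`).


-- ===== PORT A =====
-- loop over the operator list; set flag and break at the first operator found in term
def is_expr_loopA (term : String) : List String → Bool → Bool
  | [], flag => flag
  | op :: rest, flag =>
    if PySem.Str.isIn op term then true else is_expr_loopA term rest flag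

def is_expr (term : String) : Bool :=
  is_expr_loopA term ["+", "-", "*", "/", "^", "(", ")"] false

-- ===== PORT B =====
def is_expr_ops : PySem.Set Char := PySem.Set.ofList ['+', '-', '*', '/', '^', '(', ')']

def is_expr_alt (term : String) : Bool :=
  term.toList.any (fun c => PySem.Set.contains is_expr_ops c)

-- ===== PRECONDITION & SPEC =====
def Spec_is_expr (term : String) (out : Bool) : Prop := out = is_expr_alt term
instance (term : String) (out : Bool) : Decidable (Spec_is_expr term out) := by unfold Spec_is_expr; infer_instance

-- ===== CLAIM (what is proved, stated in full; the proofs are below) =====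
def Claim_equal_is_expr : Prop := ∀ (term : String), Dom_is_expr term → Spec_is_expr term (is_expr term)

-- ===== LEMMAS AND PROOFS =====

-- a one-character needle occurs as a substring iff that character is an element
theorem single_isIn (c : Char) (l : List Char) :
    PySem.Chars.isIn [c] l = l.contains c := by
  have hiff : PySem.Chars.isIn [c] l = true ↔ c ∈ l := by
    have h := PySem.Str.isIn_iff_infix (String.ofList [c]) (String.ofList l)
    simp only [PySem.Str.isIn_eq, String.toList_ofList] at h
    rw [h]
    constructor
    · intro hinf
      exact hinf.mem (List.mem_singleton.mpr rfl)
    · intro hm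
      obtain ⟨s, t, hst⟩ := List.append_of_mem hm
      exact ⟨s, t, by rw [hst]; simp⟩
  rw [Bool.eq_iff_iff, hiff]
  simp

theorem is_expr_spec' (term : String) : is_expr term = is_expr_alt term := by
  unfold is_expr is_expr_alt is_expr_ops
  simp only [is_expr_loopA, PySem.Str.isIn_eq,
    show ("+" : String).toList = ['+'] from rfl,
    show ("-" : String).toList = ['-'] from rfl,
    show ("*" : String).toList = ['*'] from rfl,
    show ("/" : String).toList = ['/'] from rfl,
    show ("^" : String).toList = ['^'] from rfl,
    show ("(" : String).toList = ['('] from rfl,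
    show (")" : String).toList = [')'] from rfl,
    single_isIn]
  rw [Bool.eq_iff_iff]
  simp only [PySem.Set.contains_eq_listContains, PySem.Set.ofList, List.any_eq_true]
  constructor
  · intro h
    split_ifs at h with h1 h2 h3 h4 h5 h6 h7
    · exact ⟨'+', by simpa using h1, by decide⟩
    · exact ⟨'-', by simpa using h2, by decide⟩
    · exact ⟨'*', by simpa using h3, by decide⟩
    · exact ⟨'/', by simpa using h4, by decide⟩
    · exact ⟨'^', by simpa using h5, by decide⟩
    · exact ⟨'(', by simpa using h6, by decide⟩
    · exact ⟨')', by simpa using h7, by decide⟩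
  · rintro ⟨c, hc, hops⟩
    have : c ∈ PySem.Set.ofList ['+', '-', '*', '/', '^', '(', ')'] := by simpa using hops
    have hc7 : c = '+' ∨ c = '-' ∨ c = '*' ∨ c = '/' ∨ c = '^' ∨ c = '(' ∨ c = ')' := by
      rw [show PySem.Set.ofList ['+', '-', '*', '/', '^', '(', ')'] =
        ['+', '-', '*', '/', '^', '(', ')'] from by decide] at this
      simpa using this
    rcases hc7 with rfl | rfl | rfl | rfl | rfl | rfl | rfl <;> simp_all

-- ===== VERDICT (by name: the statement is the Claim_ definition above) =====
theorem is_expr_spec : Claim_equal_is_expr := by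
  intro term _
  exact is_expr_spec' term
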